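-- pv_equiv track=rewrite | github.com/eva-takou/Noise_estimation_of_DEMs | sims/color_code_bare_ancilla/numerical_equations_for_color_code.py | form_equation_terms
-- ===== SOURCE A (Python) =====
-- from itertools import combinations
--
-- def form_equation_terms(target_inds, order):
--     '''target_inds: some list that contains 0,1,2 elements.
--     These correspond to the x0,x1,x2 for P(x0,x1,x2).
--     order: the order of p events we want to calculate.
--     '''
--     if target_inds==[]: #P(0,0,0) event: treat separately
--
--         rest_inds      = [0,1,2]
--         p0             = [0] ; p1  = [1] ; p2  = [2]
--         p01            = [0,1]; p02 = [0,2] ; p12 = [1,2]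
--         p012           = [0,1,2]
--         all_elements   = [p0,p1,p2,p01,p02,p12,p012]
--         all_combs      = list(combinations(all_elements,order))
--         accepted_combs = []
--
--         for comb in all_combs:
--             #All should appear an even # of times.
--
--             cnt_0,cnt_1,cnt_2 = 0,0,0
--
--             for elem in comb:
--
--                 if 0 in elem:
--                     cnt_0+=1
--                 if 1 in elem:
--                     cnt_1+=1
--                 if 2 in elem:
--                     cnt_2+=1
--
--             list_of_cnts = [cnt_0,cnt_1,cnt_2]
--
--             not_acceptable = False
--
--
--             for p in rest_inds:
--                 if list_of_cnts[p]%2==1: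
--                     not_acceptable=True
--
--             if not_acceptable==False:
--                 accepted_combs.append(comb)
--
--
--         return accepted_combs
--
--
--
--     for k in target_inds:
--         if k>2 or k<0:
--             raise Exception("Invalid indices. They should be in [0,1,2].")
--
--     all_inds  = [0,1,2]
--     rest_inds = list(set(all_inds) ^ set(target_inds) )
--
--
--     p0             = [0] ; p1  = [1] ; p2  = [2]
--     p01            = [0,1]; p02 = [0,2] ; p12 = [1,2]
--     p012           = [0,1,2]
--     all_elements   = [p0,p1,p2,p01,p02,p12,p012]
--     all_combs      = list(combinations(all_elements,order))
--     accepted_combs = []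
--
--     for comb in all_combs:
--
--         cnt_0,cnt_1,cnt_2 = 0,0,0
--
--         for elem in comb:
--
--             if 0 in elem:
--                 cnt_0+=1
--             if 1 in elem:
--                 cnt_1+=1
--             if 2 in elem:
--                 cnt_2+=1
--
--         list_of_cnts = [cnt_0,cnt_1,cnt_2]
--
--         not_acceptable = False
--         for p in target_inds:
--
--             if list_of_cnts[p]%2==0:
--                 not_acceptable=True
--
--         for p in rest_inds:
--             if list_of_cnts[p]%2==1:
--                 not_acceptable=True
--
--         if not_acceptable==False:
--             accepted_combs.append(comb)
--
--     return accepted_combs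
-- ===== SOURCE B (Python) =====
-- _ELEMS = ([0], [1], [2], [0, 1], [0, 2], [1, 2], [0, 1, 2])
-- _MASKS = (1, 2, 4, 3, 5, 6, 7)
--
--
-- def _gen(i, need, want):
--     """Suffix combinations taken from _ELEMS[i:] of size `need` whose XOR of
--     masks equals the residual `want`, in lexicographic order of indices."""
--     if need <= 0:
--         return [()] if (need == 0 and want == 0) else []
--     if 7 - i < need:
--         return []
--     with_i = [(_ELEMS[i],) + t for t in _gen(i + 1, need - 1, want ^ _MASKS[i])]
--     return with_i + _gen(i + 1, need, want)
--
--
-- def form_equation_terms(target_inds, order):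
--     for k in target_inds:
--         if k > 2 or k < 0:
--             raise Exception("Invalid indices. They should be in [0,1,2].")
--     want = 0
--     for k in target_inds:
--         want |= 1 << k
--     return _gen(0, order, want)
-- ===== Notes on version B (the rewrite author's own statement) =====
-- stated objective: alternative
-- what changed: B drops itertools.combinations and the filter-by-three-parity-counters pass entirely: a recursive backtracking generator walks the 7 elements once, threading the residual GF(2) bitmask of target_inds, pruning exhausted branches, and emitting only the accepted combinations directly.
import Mathlib
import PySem

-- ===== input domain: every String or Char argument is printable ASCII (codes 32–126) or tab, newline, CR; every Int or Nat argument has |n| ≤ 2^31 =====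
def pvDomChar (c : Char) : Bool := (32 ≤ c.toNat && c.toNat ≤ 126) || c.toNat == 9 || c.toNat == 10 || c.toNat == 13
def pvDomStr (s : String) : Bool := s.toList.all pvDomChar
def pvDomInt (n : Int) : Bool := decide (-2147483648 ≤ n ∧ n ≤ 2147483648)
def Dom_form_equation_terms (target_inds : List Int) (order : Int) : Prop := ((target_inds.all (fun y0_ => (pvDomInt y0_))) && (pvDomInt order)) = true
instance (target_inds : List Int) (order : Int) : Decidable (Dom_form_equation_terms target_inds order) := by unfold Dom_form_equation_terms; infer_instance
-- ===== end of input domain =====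

-- B replaces enumerate-all-combinations-then-filter-by-parity-counters by a recursive
-- backtracking generator that threads the residual GF(2) mask and emits only the
-- accepted combinations (objective: alternative).

-- ===== PORT A =====
-- itertools.combinations in the order Python emits them
def pvCombos {α : Type} : Nat → List α → List (List α)
  | 0, _ => [[]]
  | _ + 1, [] => []
  | r + 1, x :: xs => ((pvCombos r xs).map (fun c => x :: c)) ++ pvCombos (r + 1) xs

def pvAllElements : List (List Int) := [[0], [1], [2], [0, 1], [0, 2], [1, 2], [0, 1, 2]]

-- the inner 'for elem in comb' counting loop
def pvCnts (comb : List (List Int)) : Int × Int × Int :=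
  comb.foldl (fun c elem =>
    ((if elem.contains 0 then c.1 + 1 else c.1),
     (if elem.contains 1 then c.2.1 + 1 else c.2.1),
     (if elem.contains 2 then c.2.2 + 1 else c.2.2))) (0, 0, 0)

def form_equation_terms (target_inds : List Int) (order : Int) : List (List (List Int)) :=
  if target_inds = [] then
    -- P(0,0,0) branch of A
    let rest_inds : List Int := [0, 1, 2]
    -- combinations(·, order) raises ValueError for order < 0 (outside Pre_)
    let all_combs := if order < 0 then [] else pvCombos order.toNat pvAllElements
    all_combs.foldl (fun acc comb =>
      let c := pvCnts comb
      let cnts : List Int := [c.1, c.2.1, c.2.2]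
      let not_acceptable := rest_inds.foldl (fun b p =>
        if PySem.Int.mod ((PySem.List.pyGet? cnts p).getD 0) 2 = 1 then true else b) false
      if not_acceptable == false then acc ++ [comb] else acc) []
  else if target_inds.any (fun k => 2 < k || k < 0) then
    [] -- A raises Exception("Invalid indices...") here (outside Pre_)
  else
    -- list(set([0,1,2]) ^ set(target_inds)); under the validation just passed targets ⊆ [0,1,2],
    -- so the symmetric difference is [0,1,2] minus targets (its order only feeds parity checks)
    let rest_inds : List Int := ([0, 1, 2] : List Int).filter (fun i => !target_inds.contains i)
    let all_combs := if order < 0 then [] else pvCombos order.toNat pvAllElements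
    all_combs.foldl (fun acc comb =>
      let c := pvCnts comb
      let cnts : List Int := [c.1, c.2.1, c.2.2]
      let na1 := target_inds.foldl (fun b p =>
        if PySem.Int.mod ((PySem.List.pyGet? cnts p).getD 0) 2 = 0 then true else b) false
      let not_acceptable := rest_inds.foldl (fun b p =>
        if PySem.Int.mod ((PySem.List.pyGet? cnts p).getD 0) 2 = 1 then true else b) na1
      if not_acceptable == false then acc ++ [comb] else acc) []

-- ===== PORT B =====
def pvElems : List (List Int) := [[0], [1], [2], [0, 1], [0, 2], [1, 2], [0, 1, 2]]

def pvMasks : List Nat := [1, 2, 4, 3, 5, 6, 7]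

-- Source B's _gen: suffix combinations from _ELEMS[i:] of size `need` whose mask-XOR
-- equals the residual `want`, in lexicographic index order
-- structural fuel (8 suffices: i only grows to 7 before a base case fires) so the
-- kernel can evaluate the recursion; otherwise a step-for-step port of _gen
def pvGen : Nat → Nat → Int → Nat → List (List (List Int))
  | 0, _, _, _ => []
  | fuel + 1, i, need, want =>
    if need ≤ 0 then (if need = 0 ∧ want = 0 then [[]] else [])
    else if 7 - (i : Int) < need then []
    else
      ((pvGen fuel (i + 1) (need - 1) (want ^^^ (pvMasks[i]?).getD 0)).map
          (fun t => (pvElems[i]?).getD [] :: t))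
        ++ pvGen fuel (i + 1) need want

def form_equation_terms_alt (target_inds : List Int) (order : Int) : List (List (List Int)) :=
  if target_inds.any (fun k => 2 < k || k < 0) then
    [] -- B raises the same Exception here (outside Pre_)
  else
    let want := target_inds.foldl (fun m k => m ||| (1 <<< k.toNat)) 0
    pvGen 8 0 order want

-- ===== PRECONDITION & SPEC =====
-- Pre_ excludes exactly the inputs where A raises: an index outside [0,2]
-- (Exception) or a negative order (ValueError from combinations).
def Pre_form_equation_terms (target_inds : List Int) (order : Int) : Prop :=
  0 ≤ order ∧ ∀ k ∈ target_inds, 0 ≤ k ∧ k ≤ 2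
instance (target_inds : List Int) (order : Int) : Decidable (Pre_form_equation_terms target_inds order) := by
  unfold Pre_form_equation_terms; infer_instance

def pvWitness_form_equation_terms : List Int × Int := ([0, 1], 2)

def Spec_form_equation_terms (target_inds : List Int) (order : Int) (out : List (List (List Int))) : Prop := out = form_equation_terms_alt target_inds order
instance (target_inds : List Int) (order : Int) (out : List (List (List Int))) : Decidable (Spec_form_equation_terms target_inds order out) := by unfold Spec_form_equation_terms; infer_instance

-- ===== CLAIM (what is proved, stated in full; the proofs are below) =====
def Claim_equal_form_equation_terms : Prop := ∀ (target_inds : List Int) (order : Int), Dom_form_equation_terms target_inds order → Pre_form_equation_terms target_inds order → Spec_form_equation_terms target_inds order (form_equation_terms target_inds order)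

-- ===== LEMMAS AND PROOFS =====

-- combinations of more elements than the list has: none
theorem pvCombos_eq_nil {α : Type} (l : List α) (r : Nat) (h : l.length < r) :
    pvCombos r l = [] := by
  induction l generalizing r with
  | nil => cases r with
    | zero => omega
    | succ r => rfl
  | cons x xs ih =>
    cases r with
    | zero => omega
    | succ r =>
      simp only [List.length_cons] at h
      simp only [pvCombos]
      rw [ih r (by omega), ih (r + 1) (by omega)]
      simp

-- 'flag := flag or q(x)' loop = any
theorem foldl_if_true (l : List Int) (q : Int → Prop) [DecidablePred q] (b : Bool) :
    l.foldl (fun b p => if q p then true else b) b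
      = (b || l.any (fun p => decide (q p))) := by
  induction l generalizing b with
  | nil => simp
  | cons x xs ih =>
    simp only [List.foldl_cons, List.any_cons, ih]
    by_cases hx : q x <;> cases b <;> simp [hx]

-- any over a list whose members all lie in {0,1,2}
theorem any_mem012 (l : List Int) (h : ∀ p ∈ l, p = 0 ∨ p = 1 ∨ p = 2) (q : Int → Bool) :
    l.any q = ((decide ((0 : Int) ∈ l) && q 0) || (decide ((1 : Int) ∈ l) && q 1)
      || (decide ((2 : Int) ∈ l) && q 2)) := by
  rw [Bool.eq_iff_iff]
  simp only [List.any_eq_true, Bool.or_eq_true, Bool.and_eq_true, decide_eq_true_eq]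
  constructor
  · rintro ⟨p, hp, hq⟩
    rcases h p hp with rfl | rfl | rfl
    · exact Or.inl (Or.inl ⟨hp, hq⟩)
    · exact Or.inl (Or.inr ⟨hp, hq⟩)
    · exact Or.inr ⟨hp, hq⟩
  · rintro ((⟨hm, hq⟩ | ⟨hm, hq⟩) | ⟨hm, hq⟩) <;> exact ⟨_, hm, hq⟩

-- the abstract target mask as a function of the three memberships
def pvTMask (t0 t1 t2 : Bool) : Nat :=
  (if t0 then 1 else 0) ||| (if t1 then 2 else 0) ||| (if t2 then 4 else 0)

theorem mask_fold (l : List Int) (h : ∀ p ∈ l, p = 0 ∨ p = 1 ∨ p = 2) (acc : Nat) :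
    l.foldl (fun m k => m ||| (1 <<< k.toNat)) acc
      = acc ||| pvTMask (decide ((0 : Int) ∈ l)) (decide ((1 : Int) ∈ l)) (decide ((2 : Int) ∈ l)) := by
  induction l generalizing acc with
  | nil => simp [pvTMask]
  | cons x xs ih =>
    have hx := h x (by simp)
    have ihs := ih (fun p hp => h p (by simp [hp]))
    simp only [List.foldl_cons, ihs, List.mem_cons]
    rw [Nat.lor_assoc]
    congr 1
    rcases hx with rfl | rfl | rfl <;>
      cases hh0 : (decide ((0:Int) ∈ xs)) <;> cases hh1 : (decide ((1:Int) ∈ xs)) <;>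
      cases hh2 : (decide ((2:Int) ∈ xs)) <;>
      simp only [decide_eq_true_eq, decide_eq_false_iff_not] at hh0 hh1 hh2 <;>
      simp [pvTMask, hh0, hh1, hh2]

-- abstract view of program A, parametrised by the three memberships and Nat order
def pvNa (t0 t1 t2 : Bool) (comb : List (List Int)) : Bool :=
  let c := pvCnts comb
  let cnts : List Int := [c.1, c.2.1, c.2.2]
  let q0 : Int → Bool := fun p => decide (PySem.Int.mod ((PySem.List.pyGet? cnts p).getD 0) 2 = 0)
  let q1 : Int → Bool := fun p => decide (PySem.Int.mod ((PySem.List.pyGet? cnts p).getD 0) 2 = 1)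
  ((t0 && q0 0) || (t1 && q0 1) || (t2 && q0 2))
    || ((!t0 && q1 0) || (!t1 && q1 1) || (!t2 && q1 2))

def pvAview (t0 t1 t2 : Bool) (r : Nat) : List (List (List Int)) :=
  (pvCombos r pvAllElements).filter (fun comb => !pvNa t0 t1 t2 comb)

set_option maxHeartbeats 1000000 in
theorem A_eq_view (target_inds : List Int) (order : Int)
    (hk : ∀ k ∈ target_inds, 0 ≤ k ∧ k ≤ 2) (ho : 0 ≤ order) :
    form_equation_terms target_inds order
      = pvAview (decide ((0 : Int) ∈ target_inds)) (decide ((1 : Int) ∈ target_inds))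
          (decide ((2 : Int) ∈ target_inds)) order.toNat := by
  have h012 : ∀ p ∈ target_inds, p = 0 ∨ p = 1 ∨ p = 2 := by
    intro p hp; have := hk p hp; omega
  have hguard : target_inds.any (fun k => 2 < k || k < 0) = false := by
    rw [List.any_eq_false]
    intro k hkk
    have := hk k hkk
    simp only [Bool.or_eq_true, decide_eq_true_eq, not_or]
    omega
  unfold form_equation_terms
  by_cases hnil : target_inds = []
  · subst hnil
    simp only [if_neg (by omega : ¬ order < 0), reduceIte]
    rw [PySem.List.foldl_append_if_eq_filter]
    unfold pvAview
    rw [List.nil_append]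
    apply List.filter_congr
    intro comb _
    rw [foldl_if_true]
    rw [Bool.eq_iff_iff]
    simp only [pvNa, List.any_cons, List.any_nil, List.not_mem_nil, decide_false,
      Bool.false_and, Bool.false_or, Bool.or_false, Bool.not_false, Bool.true_and,
      Bool.not_eq_true', beq_iff_eq, Bool.or_eq_false_iff, decide_eq_false_iff_not]
    tauto
  · rw [if_neg hnil, if_neg (by simp [hguard]), if_neg (by omega : ¬ order < 0)]
    rw [PySem.List.foldl_append_if_eq_filter]
    unfold pvAview
    rw [List.nil_append]
    apply List.filter_congr
    intro comb _
    rw [foldl_if_true, foldl_if_true]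
    rw [any_mem012 target_inds h012]
    have hrest : ∀ (q : Int → Bool),
        (([0,1,2] : List Int).filter (fun i => !target_inds.contains i)).any q
          = ((!target_inds.contains 0 && q 0) || (!target_inds.contains 1 && q 1)
              || (!target_inds.contains 2 && q 2)) := by
      intro q
      simp only [List.filter]
      cases target_inds.contains (0:Int) <;> cases target_inds.contains (1:Int) <;>
        cases target_inds.contains (2:Int) <;> simp [Bool.or_assoc]
    rw [hrest]
    rw [Bool.eq_iff_iff]
    simp only [pvNa, List.contains_eq_mem, Bool.or_eq_false_iff,
      Bool.and_eq_false_iff, decide_eq_true_eq, decide_eq_false_iff_not, beq_iff_eq,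
      Bool.not_eq_eq_eq_not, Bool.not_true, Bool.not_false]
    tauto

theorem B_eq_view (target_inds : List Int) (order : Int)
    (hk : ∀ k ∈ target_inds, 0 ≤ k ∧ k ≤ 2) :
    form_equation_terms_alt target_inds order
      = pvGen 8 0 order (pvTMask (decide ((0 : Int) ∈ target_inds))
          (decide ((1 : Int) ∈ target_inds)) (decide ((2 : Int) ∈ target_inds))) := by
  have h012 : ∀ p ∈ target_inds, p = 0 ∨ p = 1 ∨ p = 2 := by
    intro p hp; have := hk p hp; omega
  have hguard : target_inds.any (fun k => 2 < k || k < 0) = false := by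
    rw [List.any_eq_false]
    intro k hkk
    have := hk k hkk
    simp only [Bool.or_eq_true, decide_eq_true_eq, not_or]
    omega
  unfold form_equation_terms_alt
  rw [if_neg (by simp [hguard])]
  rw [mask_fold target_inds h012, Nat.zero_or]

-- pvGen with more slots than remaining elements: none
theorem pvGen_big (r : Nat) (w : Nat) (h : 7 < r) : pvGen 8 0 ((r : Int)) w = [] := by
  rw [pvGen]
  rw [if_neg (by omega), if_pos (by omega)]

theorem view_eq (t0 t1 t2 : Bool) (r : Nat) :
    pvAview t0 t1 t2 r = pvGen 8 0 ((r : Int)) (pvTMask t0 t1 t2) := by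
  by_cases h : r ≤ 7
  · revert t0 t1 t2
    interval_cases r <;> decide
  · rw [pvGen_big r _ (by omega)]
    unfold pvAview
    rw [pvCombos_eq_nil _ r (by simp [pvAllElements]; omega)]
    simp

-- ===== VERDICT (by name: the statement is the Claim_ definition above) =====
theorem form_equation_terms_spec : Claim_equal_form_equation_terms := by
  intro target_inds order _ hpre
  obtain ⟨ho, hk⟩ := hpre
  unfold Spec_form_equation_terms
  rw [A_eq_view target_inds order hk ho, B_eq_view target_inds order hk, view_eq]
  have h2 : ((order.toNat : Nat) : Int) = order := by omega
  rw [h2]
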